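-- pv_equiv track=rewrite | github.com/Pilha-DS/HashChain---encryption | EmTeste/app2.py | encontrar_possiveis_tamanhos
-- ===== SOURCE A (Python) =====
-- def encontrar_possiveis_tamanhos(texto_criptografado):
--     """Encontra possíveis tamanhos de bloco analisando padrões de #"""
--     possiveis_tamanhos = set()
--
--     # Encontrar todas as posições onde começa um bloco (# após não-# ou início)
--     inicios = [0]
--     for i in range(1, len(texto_criptografado)):
--         if texto_criptografado[i] == '#' and texto_criptografado[i-1] != '#':
--             inicios.append(i)
--
--     # Calcular diferenças entre inícios como possíveis tamanhos
--     for i in range(1, len(inicios)):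
--         tamanho = inicios[i] - inicios[i-1]
--         if 8 <= tamanho <= 24:  # Faixa razoável baseada na sua nota
--             possiveis_tamanhos.add(tamanho)
--
--     # Também considerar do último início até o final
--     ultimo_tamanho = len(texto_criptografado) - inicios[-1]
--     if 8 <= ultimo_tamanho <= 24:
--         possiveis_tamanhos.add(ultimo_tamanho)
--
--     return sorted(possiveis_tamanhos)
-- ===== SOURCE B (Python) =====
-- def encontrar_possiveis_tamanhos(texto_criptografado):
--     """Encontra possiveis tamanhos de bloco saltando de run de '#' em run de '#'"""
--     t = texto_criptografado
--     n = len(t)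
--     tamanhos = set()
--     p = 0
--     while True:
--         j = p
--         while j < n and t[j] == '#':
--             j += 1
--         while j < n and t[j] != '#':
--             j += 1
--         d = j - p
--         if 8 <= d <= 24:
--             tamanhos.add(d)
--         if j == n:
--             break
--         p = j
--     return sorted(tamanhos)
-- ===== Notes on version B (the rewrite author's own statement) =====
-- stated objective: alternative
-- what changed: Replaced A's boundary-predicate scan (per-index test t[i]=='#' and t[i-1]!='#', materialised start list, second differencing pass plus a separate tail term) by a run-jumping scan: an outer loop whose step skips one whole '#'-run and the following non-'#' stretch, treating every gap (including the tail) by the same uniform rule, with no i-1 lookups and no start list.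
import Mathlib
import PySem

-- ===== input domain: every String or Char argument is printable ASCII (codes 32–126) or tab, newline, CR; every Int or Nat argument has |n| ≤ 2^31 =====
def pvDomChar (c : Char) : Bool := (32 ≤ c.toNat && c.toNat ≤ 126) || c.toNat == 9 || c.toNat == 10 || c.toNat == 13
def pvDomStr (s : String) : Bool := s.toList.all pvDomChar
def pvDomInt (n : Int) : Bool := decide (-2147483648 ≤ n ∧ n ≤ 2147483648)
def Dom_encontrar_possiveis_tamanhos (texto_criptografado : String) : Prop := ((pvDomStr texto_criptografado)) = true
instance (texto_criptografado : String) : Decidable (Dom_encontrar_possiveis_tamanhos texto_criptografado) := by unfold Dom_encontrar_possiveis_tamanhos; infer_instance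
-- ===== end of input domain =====

-- B replaces A's boundary-predicate scan (per-index test on t[i] and t[i-1], a start list,
-- then a differencing pass plus a tail term) by a run-jumping scan whose step skips a whole
-- '#'-run and the following non-'#' stretch, with one uniform gap rule; objective: alternative.

-- ===== PORT A =====
-- All list indices A uses (i and i-1 with 1 ≤ i < len; inicios[-1] of a nonempty list) are
-- in range in Python, so the total pyGetD is exact here.
def encontrar_possiveis_tamanhos (texto_criptografado : String) : List Int :=
  let chars := texto_criptografado.toList
  let n : Int := (chars.length : Int)
  let inicios : List Int :=
    (PySem.List.pyRange 1 n 1).foldl (fun ins i =>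
      if (PySem.List.pyGetD chars i ' ' == '#') && !(PySem.List.pyGetD chars (i-1) ' ' == '#')
      then ins ++ [i] else ins) [0]
  let ps : PySem.Set Int :=
    (PySem.List.pyRange 1 (inicios.length : Int) 1).foldl (fun s i =>
      let tamanho := PySem.List.pyGetD inicios i 0 - PySem.List.pyGetD inicios (i-1) 0
      if 8 ≤ tamanho ∧ tamanho ≤ 24 then PySem.Set.add s tamanho else s) PySem.Set.empty
  let ultimo := n - PySem.List.pyGetD inicios (-1) 0
  let ps := if 8 ≤ ultimo ∧ ultimo ≤ 24 then PySem.Set.add ps ultimo else ps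
  PySem.List.sorted ps (fun x => x) false

-- ===== PORT B =====
-- Source B's inner `while j < n and t[j] == '#'` loop (fuel = remaining length, ample by construction):
def pvSkipHashGo (chars : List Char) : Nat → Nat → Nat
  | 0, j => j
  | fuel+1, j =>
    if h : j < chars.length then
      if chars[j] = '#' then pvSkipHashGo chars fuel (j+1) else j
    else j

def pvSkipHash (chars : List Char) (j : Nat) : Nat :=
  pvSkipHashGo chars (chars.length - j) j

-- Source B's inner `while j < n and t[j] != '#'` loop:
def pvSkipNonHashGo (chars : List Char) : Nat → Nat → Nat
  | 0, j => j
  | fuel+1, j =>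
    if h : j < chars.length then
      if chars[j] ≠ '#' then pvSkipNonHashGo chars fuel (j+1) else j
    else j

def pvSkipNonHash (chars : List Char) (j : Nat) : Nat :=
  pvSkipNonHashGo chars (chars.length - j) j

/-- Source B's outer `while True` loop: state (p, tamanhos); each pass strictly increases p,
so `length + 1` units of fuel always suffice. -/
def pvLoopGo (chars : List Char) : Nat → Nat → PySem.Set Int → PySem.Set Int
  | 0, _, s => s
  | fuel+1, p, s =>
    let j := pvSkipNonHash chars (pvSkipHash chars p)
    let d : Int := (j : Int) - (p : Int)
    let s' := if 8 ≤ d ∧ d ≤ 24 then PySem.Set.add s d else s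
    if j < chars.length then pvLoopGo chars fuel j s' else s'

def pvLoop (chars : List Char) (p : Nat) (s : PySem.Set Int) : PySem.Set Int :=
  pvLoopGo chars (chars.length + 1 - p) p s

def encontrar_possiveis_tamanhos_alt (texto_criptografado : String) : List Int :=
  let chars := texto_criptografado.toList
  PySem.List.sorted (pvLoop chars 0 PySem.Set.empty) (fun x => x) false

-- ===== PRECONDITION & SPEC =====
def Spec_encontrar_possiveis_tamanhos (texto_criptografado : String) (out : List Int) : Prop := out = encontrar_possiveis_tamanhos_alt texto_criptografado
instance (texto_criptografado : String) (out : List Int) : Decidable (Spec_encontrar_possiveis_tamanhos texto_criptografado out) := by unfold Spec_encontrar_possiveis_tamanhos; infer_instance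

-- ===== CLAIM (what is proved, stated in full; the proofs are below) =====
def Claim_equal_encontrar_possiveis_tamanhos : Prop := ∀ (texto_criptografado : String), Dom_encontrar_possiveis_tamanhos texto_criptografado → Spec_encontrar_possiveis_tamanhos texto_criptografado (encontrar_possiveis_tamanhos texto_criptografado)

-- ===== LEMMAS AND PROOFS =====

/-- The shared range filter `8 ≤ d ≤ 24 → add`. -/
def pvDiffStep (s : PySem.Set Int) (d : Int) : PySem.Set Int :=
  if 8 ≤ d ∧ d ≤ 24 then PySem.Set.add s d else s

/-- A's second loop: fold the consecutive differences of `ins` (via indexing) into a set. -/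
def pvDiffY (ins : List Int) (s : PySem.Set Int) : PySem.Set Int :=
  (PySem.List.pyRange 1 (ins.length : Int) 1).foldl (fun s i =>
    let tamanho := PySem.List.pyGetD ins i 0 - PySem.List.pyGetD ins (i-1) 0
    if 8 ≤ tamanho ∧ tamanho ≤ 24 then PySem.Set.add s tamanho else s) s

/-- A's first loop step, abstracted over the character condition. -/
def pvStepA (cond : Int → Bool) (ins : List Int) (i : Int) : List Int :=
  if cond i then ins ++ [i] else ins

/-- A streaming (set, prev) step used as a proof intermediate between the two ports. -/
def pvStepB (cond : Int → Bool) (st : PySem.Set Int × Int) (i : Int) : PySem.Set Int × Int :=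
  if cond i then (pvDiffStep st.1 (i - st.2), i) else st

/-- The condition A's first loop tests at index `i`. -/
def pvCond (chars : List Char) (i : Int) : Bool :=
  (PySem.List.pyGetD chars i ' ' == '#') && !(PySem.List.pyGetD chars (i-1) ' ' == '#')

/-- Port A, rephrased through the proof helpers (definitional). -/
def pvAfinal (t : String) : List Int :=
  PySem.List.sorted
    (pvDiffStep
      (pvDiffY ((PySem.List.pyRange 1 (t.toList.length : Int) 1).foldl
        (pvStepA (pvCond t.toList)) [0]) PySem.Set.empty)
      ((t.toList.length : Int) -
        PySem.List.pyGetD ((PySem.List.pyRange 1 (t.toList.length : Int) 1).foldl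
          (pvStepA (pvCond t.toList)) [0]) (-1) 0))
    (fun x => x) false

/-- The streaming intermediate form, as a set. -/
def pvStreamSet (chars : List Char) (p : Nat) (s : PySem.Set Int) : PySem.Set Int :=
  pvDiffStep
    (((PySem.List.pyRange ((p : Int)+1) (chars.length : Int) 1).foldl
      (pvStepB (pvCond chars)) (s, (p : Int))).1)
    ((chars.length : Int) -
      ((PySem.List.pyRange ((p : Int)+1) (chars.length : Int) 1).foldl
        (pvStepB (pvCond chars)) (s, (p : Int))).2)

lemma pvA_eq (t : String) : encontrar_possiveis_tamanhos t = pvAfinal t := rfl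

lemma pvFoldA_ne_nil (cond : Int → Bool) (r : List Int) (ins : List Int)
    (h : ins ≠ []) : r.foldl (pvStepA cond) ins ≠ [] := by
  induction r generalizing ins with
  | nil => exact h
  | cons i r ih =>
    simp only [List.foldl_cons]
    apply ih
    unfold pvStepA
    split
    · simp
    · exact h

lemma pvGetD_append_left (ins : List Int) (x : Int) (k : Nat) (hk : k < ins.length) (d : Int) :
    PySem.List.pyGetD (ins ++ [x]) (k : Int) d = PySem.List.pyGetD ins (k : Int) d := by
  simp only [PySem.List.pyGetD_natCast]
  rw [List.getD_eq_getElem?_getD, List.getD_eq_getElem?_getD, List.getElem?_append_left hk]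

lemma pvDiffY_append (ins : List Int) (x : Int) (h : ins ≠ []) (s : PySem.Set Int) :
    pvDiffY (ins ++ [x]) s = pvDiffStep (pvDiffY ins s) (x - ins.getLastD 0) := by
  unfold pvDiffY pvDiffStep
  have hlen : ((ins ++ [x]).length : Int) = (ins.length : Int) + 1 := by simp
  have hpos : (1 : Int) ≤ (ins.length : Int) := by
    have := List.length_pos_iff.mpr h; omega
  rw [hlen, PySem.List.pyRange_one_succ_right hpos, List.foldl_append]
  rw [PySem.List.foldl_congr_mem _ _
    (fun s i =>
      let tamanho := PySem.List.pyGetD ins i 0 - PySem.List.pyGetD ins (i-1) 0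
      if 8 ≤ tamanho ∧ tamanho ≤ 24 then PySem.Set.add s tamanho else s) s ?_]
  · rw [List.foldl_cons, List.foldl_nil]
    have hlast : PySem.List.pyGetD (ins ++ [x]) ((ins.length : Int)) 0 = x := by
      simp [PySem.List.pyGetD_natCast, List.getD_eq_getElem?_getD]
    have hprev : PySem.List.pyGetD (ins ++ [x]) ((ins.length : Int) - 1) 0 = ins.getLastD 0 := by
      have hlp := List.length_pos_iff.mpr h
      have hk : ((ins.length - 1 : Nat) : Int) = (ins.length : Int) - 1 := by omega
      rw [← hk, pvGetD_append_left ins x (ins.length - 1) (by omega) 0]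
      simp only [PySem.List.pyGetD_natCast]
      rw [List.getD_eq_getElem?_getD, List.getElem?_eq_getElem (by omega)]
      simp [List.getLast_eq_getElem,
            List.getLastD_eq_getLast?, List.getLast?_eq_some_getLast h]
    rw [hlast, hprev]
  · intro a i hi
    obtain ⟨h1, h2⟩ := (PySem.List.mem_pyRange_one).1 hi
    obtain ⟨k, hk⟩ : ∃ k : Nat, (k : Int) = i := ⟨i.toNat, by omega⟩
    obtain ⟨k', hk1⟩ : ∃ k' : Nat, (k' : Int) = i - 1 := ⟨(i-1).toNat, by omega⟩
    rw [← hk]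
    have hkk : (k : Int) - 1 = (k' : Int) := by omega
    rw [hkk, pvGetD_append_left ins x k (by omega) 0, pvGetD_append_left ins x k' (by omega) 0]
    simp only [← hkk]

lemma pvInv (cond : Int → Bool) (r : List Int) (ins : List Int)
    (h : ins ≠ []) (s0 : PySem.Set Int) :
    r.foldl (pvStepB cond) (pvDiffY ins s0, ins.getLastD 0) =
      (pvDiffY (r.foldl (pvStepA cond) ins) s0, (r.foldl (pvStepA cond) ins).getLastD 0) := by
  induction r generalizing ins with
  | nil => rfl
  | cons i r ih =>
    simp only [List.foldl_cons]
    by_cases hc : cond i = true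
    · rw [show pvStepA cond ins i = ins ++ [i] from by simp [pvStepA, hc],
          show pvStepB cond (pvDiffY ins s0, ins.getLastD 0) i =
            (pvDiffStep (pvDiffY ins s0) (i - ins.getLastD 0), i) from by simp [pvStepB, hc],
          ← pvDiffY_append ins i h s0]
      have hrec := ih (ins ++ [i]) (by simp)
      rw [List.getLastD_concat] at hrec
      exact hrec
    · rw [show pvStepA cond ins i = ins from by simp [pvStepA, hc],
          show pvStepB cond (pvDiffY ins s0, ins.getLastD 0) i =
            (pvDiffY ins s0, ins.getLastD 0) from by simp [pvStepB, hc]]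
      exact ih ins h

/-- Port A's set equals the streaming intermediate started at p = 0. -/
lemma pvA_stream (t : String) :
    pvAfinal t = PySem.List.sorted (pvStreamSet t.toList 0 PySem.Set.empty) (fun x => x) false := by
  unfold pvAfinal pvStreamSet
  set chars := t.toList
  set n : Int := (chars.length : Int) with hn
  set cond := pvCond chars with hcond
  set insA := (PySem.List.pyRange 1 n 1).foldl (pvStepA cond) [0] with hinsA
  have hne : insA ≠ [] := pvFoldA_ne_nil cond _ [0] (by simp)
  have hinit : pvDiffY [0] PySem.Set.empty = PySem.Set.empty := by
    unfold pvDiffY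
    rw [show (([0] : List Int).length : Int) = 1 by simp,
        PySem.List.pyRange_one_eq_nil (by omega)]
    rfl
  have hinv := pvInv cond (PySem.List.pyRange 1 n 1) [0] (by simp) PySem.Set.empty
  rw [hinit] at hinv
  have hlast0 : ([0] : List Int).getLastD 0 = 0 := rfl
  rw [hlast0, ← hinsA] at hinv
  have hneg : PySem.List.pyGetD insA (-1) 0 = insA.getLastD 0 := by
    rw [PySem.List.pyGetD_neg_one insA 0 hne]
    simp [List.getLastD_eq_getLast?, List.getLast?_eq_some_getLast hne]
  simp only [Nat.cast_zero, zero_add]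
  rw [hinv, hneg]

-- ===== run-jump side: characterisation of the skip loops =====

lemma pvSkipHashGo_ge (chars : List Char) : ∀ (fuel j : Nat), j ≤ pvSkipHashGo chars fuel j := by
  intro fuel
  induction fuel with
  | zero => intro j; simp [pvSkipHashGo]
  | succ f ih =>
    intro j
    simp only [pvSkipHashGo]
    split_ifs with h hc
    · have := ih (j+1); omega
    · omega
    · omega

lemma pvSkipNonHashGo_ge (chars : List Char) : ∀ (fuel j : Nat), j ≤ pvSkipNonHashGo chars fuel j := by
  intro fuel
  induction fuel with
  | zero => intro j; simp [pvSkipNonHashGo]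
  | succ f ih =>
    intro j
    simp only [pvSkipNonHashGo]
    split_ifs with h hc
    · have := ih (j+1); omega
    · omega
    · omega

lemma pvSkipHash_ge (chars : List Char) (j : Nat) : j ≤ pvSkipHash chars j :=
  pvSkipHashGo_ge chars (chars.length - j) j

lemma pvSkipNonHash_ge (chars : List Char) (j : Nat) : j ≤ pvSkipNonHash chars j :=
  pvSkipNonHashGo_ge chars (chars.length - j) j

lemma pvSkipHash_of_ge (chars : List Char) (j : Nat) (h : chars.length ≤ j) :
    pvSkipHash chars j = j := by
  unfold pvSkipHash
  rw [Nat.sub_eq_zero_of_le h]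
  simp [pvSkipHashGo]

lemma pvSkipNonHash_of_ge (chars : List Char) (j : Nat) (h : chars.length ≤ j) :
    pvSkipNonHash chars j = j := by
  unfold pvSkipNonHash
  rw [Nat.sub_eq_zero_of_le h]
  simp [pvSkipNonHashGo]

lemma pvSkipHashGo_spec (chars : List Char) : ∀ (fuel j : Nat),
    chars.length ≤ fuel + j → j ≤ chars.length →
    pvSkipHashGo chars fuel j ≤ chars.length ∧
    (∀ i, j ≤ i → i < pvSkipHashGo chars fuel j → chars.getD i ' ' = '#') ∧
    (pvSkipHashGo chars fuel j < chars.length → chars.getD (pvSkipHashGo chars fuel j) ' ' ≠ '#') := by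
  intro fuel
  induction fuel with
  | zero =>
    intro j h1 h2
    simp only [pvSkipHashGo]
    exact ⟨h2, fun i hi1 hi2 => absurd hi2 (by omega), fun h3 => absurd h3 (by omega)⟩
  | succ f ih =>
    intro j h1 h2
    simp only [pvSkipHashGo]
    split_ifs with h hc
    · obtain ⟨a, b, c⟩ := ih (j+1) (by omega) (by omega)
      refine ⟨a, ?_, c⟩
      intro i hi1 hi2
      rcases Nat.eq_or_lt_of_le hi1 with heq | hlt
      · rw [← heq, List.getD_eq_getElem _ _ h]; exact hc
      · exact b i hlt hi2
    · exact ⟨by omega, fun i hi1 hi2 => absurd hi2 (by omega),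
        fun _ => by rw [List.getD_eq_getElem _ _ h]; exact hc⟩
    · exact ⟨h2, fun i hi1 hi2 => absurd hi2 (by omega), fun h3 => absurd h3 (by omega)⟩

lemma pvSkipNonHashGo_spec (chars : List Char) : ∀ (fuel j : Nat),
    chars.length ≤ fuel + j → j ≤ chars.length →
    pvSkipNonHashGo chars fuel j ≤ chars.length ∧
    (∀ i, j ≤ i → i < pvSkipNonHashGo chars fuel j → chars.getD i ' ' ≠ '#') ∧
    (pvSkipNonHashGo chars fuel j < chars.length →
      chars.getD (pvSkipNonHashGo chars fuel j) ' ' = '#') := by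
  intro fuel
  induction fuel with
  | zero =>
    intro j h1 h2
    simp only [pvSkipNonHashGo]
    exact ⟨h2, fun i hi1 hi2 => absurd hi2 (by omega), fun h3 => absurd h3 (by omega)⟩
  | succ f ih =>
    intro j h1 h2
    simp only [pvSkipNonHashGo]
    split_ifs with h hc
    · obtain ⟨a, b, c⟩ := ih (j+1) (by omega) (by omega)
      refine ⟨a, ?_, c⟩
      intro i hi1 hi2
      rcases Nat.eq_or_lt_of_le hi1 with heq | hlt
      · rw [← heq, List.getD_eq_getElem _ _ h]; exact hc
      · exact b i hlt hi2
    · refine ⟨by omega, fun i hi1 hi2 => absurd hi2 (by omega), fun _ => ?_⟩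
      rw [List.getD_eq_getElem _ _ h]
      simpa using hc
    · exact ⟨h2, fun i hi1 hi2 => absurd hi2 (by omega), fun h3 => absurd h3 (by omega)⟩

lemma pvSkipHash_spec (chars : List Char) (p : Nat) (hp : p ≤ chars.length) :
    pvSkipHash chars p ≤ chars.length ∧
    (∀ i, p ≤ i → i < pvSkipHash chars p → chars.getD i ' ' = '#') ∧
    (pvSkipHash chars p < chars.length → chars.getD (pvSkipHash chars p) ' ' ≠ '#') :=
  pvSkipHashGo_spec chars (chars.length - p) p (by omega) hp

lemma pvSkipNonHash_spec (chars : List Char) (p : Nat) (hp : p ≤ chars.length) :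
    pvSkipNonHash chars p ≤ chars.length ∧
    (∀ i, p ≤ i → i < pvSkipNonHash chars p → chars.getD i ' ' ≠ '#') ∧
    (pvSkipNonHash chars p < chars.length → chars.getD (pvSkipNonHash chars p) ' ' = '#') :=
  pvSkipNonHashGo_spec chars (chars.length - p) p (by omega) hp

/-- One step of Source B's outer loop strictly advances while p is in range. -/
lemma pvJump_gt (chars : List Char) (p : Nat) (h : p < chars.length) :
    p < pvSkipNonHash chars (pvSkipHash chars p) := by
  have hk : chars.length - p = (chars.length - (p+1)) + 1 := by omega
  by_cases hc : chars[p] = '#'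
  · have e : pvSkipHash chars p = pvSkipHashGo chars (chars.length - (p+1)) (p+1) := by
      unfold pvSkipHash
      rw [hk]
      simp only [pvSkipHashGo]
      rw [dif_pos h, if_pos hc]
    have h2 := pvSkipHashGo_ge chars (chars.length - (p+1)) (p+1)
    have h3 := pvSkipNonHash_ge chars (pvSkipHash chars p)
    omega
  · have e : pvSkipHash chars p = p := by
      unfold pvSkipHash
      rw [hk]
      simp only [pvSkipHashGo]
      rw [dif_pos h, if_neg hc]
    rw [e]
    have e2 : pvSkipNonHash chars p = pvSkipNonHashGo chars (chars.length - (p+1)) (p+1) := by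
      unfold pvSkipNonHash
      rw [hk]
      simp only [pvSkipNonHashGo]
      rw [dif_pos h, if_pos hc]
    have h3 := pvSkipNonHashGo_ge chars (chars.length - (p+1)) (p+1)
    omega

/-- pvCond at a Nat index 1 ≤ k < len, in terms of getD. -/
lemma pvCond_nat (chars : List Char) (k : Nat) (h1 : 1 ≤ k) :
    pvCond chars (k : Int) =
      ((chars.getD k ' ' == '#') && !(chars.getD (k-1) ' ' == '#')) := by
  unfold pvCond
  have hk : ((k : Int) - 1) = ((k - 1 : Nat) : Int) := by omega
  rw [hk]
  simp only [PySem.List.pyGetD_natCast]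

lemma pvFold_unchanged (cond : Int → Bool) (l : List Int) (st : PySem.Set Int × Int)
    (h : ∀ i ∈ l, cond i = false) : l.foldl (pvStepB cond) st = st := by
  induction l generalizing st with
  | nil => rfl
  | cons i l ih =>
    simp only [List.foldl_cons]
    rw [show pvStepB cond st i = st from by simp [pvStepB, h i (by simp)]]
    exact ih st (fun j hj => h j (by simp [hj]))

/-- Main bridge: the streaming scan from a block start p equals Source B's run-jumping loop. -/
lemma pvMain (chars : List Char) : ∀ fuel p s, chars.length - p < fuel → p ≤ chars.length →
    (p = 0 ∨ (p < chars.length ∧ chars.getD p ' ' = '#')) →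
    pvStreamSet chars p s = pvLoopGo chars fuel p s := by
  intro fuel
  induction fuel with
  | zero => intro p s hm _ _; exact absurd hm (by omega)
  | succ fuel ih =>
    intro p s hm hp hstart
    by_cases hpl : p = chars.length
    · -- only reachable as p = 0 on the empty string
      have hp0 : p = 0 := by
        rcases hstart with h | h
        · exact h
        · exact absurd h.1 (by omega)
      have hn0 : chars.length = 0 := by omega
      subst hp0
      have e1 : pvSkipNonHash chars (pvSkipHash chars 0) = 0 := by
        rw [pvSkipHash_of_ge chars 0 (by omega), pvSkipNonHash_of_ge chars 0 (by omega)]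
      simp only [pvLoopGo]
      unfold pvStreamSet
      rw [PySem.List.pyRange_one_eq_nil (by simp [hn0])]
      simp [e1, hn0, pvDiffStep]
    · have hplt : p < chars.length := by omega
      obtain ⟨hq1, hq2, hq3⟩ := pvSkipHash_spec chars p hp
      have hqge := pvSkipHash_ge chars p
      obtain ⟨hj1, hj2, hj3⟩ := pvSkipNonHash_spec chars (pvSkipHash chars p) (by omega)
      have hjge := pvSkipNonHash_ge chars (pvSkipHash chars p)
      have hpj : p < pvSkipNonHash chars (pvSkipHash chars p) := pvJump_gt chars p hplt
      set q := pvSkipHash chars p with hq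
      set j := pvSkipNonHash chars q with hj
      have hjj : pvSkipNonHash chars (pvSkipHash chars p) = j := by
        rw [← hq]
      -- no boundary index strictly between p and j
      have hnone : ∀ i : Nat, p < i → i < j → pvCond chars (i : Int) = false := by
        intro i hi1 hi2
        rw [pvCond_nat chars i (by omega)]
        by_cases hiq : i < q
        · -- inside the '#'-run: previous char is also '#'
          have hprev : chars.getD (i-1) ' ' = '#' := hq2 (i-1) (by omega) (by omega)
          simp only [List.getD] at hprev
          simp [hprev]
        · -- at or after the run end: char itself is not '#'
          have hcur : chars.getD i ' ' ≠ '#' := hj2 i (by omega) hi2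
          simp only [List.getD] at hcur
          simp [hcur]
      have hsplit1 : PySem.List.pyRange ((p : Int)+1) (chars.length : Int) 1 =
          PySem.List.pyRange ((p : Int)+1) (j : Int) 1 ++
          PySem.List.pyRange (j : Int) (chars.length : Int) 1 :=
        PySem.List.pyRange_one_append _ _ _ (by omega) (by omega)
      have hfold1 : (PySem.List.pyRange ((p : Int)+1) (j : Int) 1).foldl
          (pvStepB (pvCond chars)) (s, (p : Int)) = (s, (p : Int)) := by
        apply pvFold_unchanged
        intro i hi
        obtain ⟨hi1, hi2⟩ := (PySem.List.mem_pyRange_one).1 hi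
        obtain ⟨k, hk⟩ : ∃ k : Nat, (k : Int) = i := ⟨i.toNat, by omega⟩
        rw [← hk]; exact hnone k (by omega) (by omega)
      by_cases hjl : j < chars.length
      · -- j is the next block start
        have hcj : chars.getD j ' ' = '#' := hj3 hjl
        have hqj : q < j := by
          rcases Nat.eq_or_lt_of_le hjge with heq | h
          · exact absurd (by rw [heq]; exact hcj) (hq3 (by omega))
          · exact h
        have hcondj : pvCond chars (j : Int) = true := by
          rw [pvCond_nat chars j (by omega)]
          have hprev : chars.getD (j-1) ' ' ≠ '#' := hj2 (j-1) (by omega) (by omega)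
          simp only [List.getD] at hcj hprev
          simp [hcj, hprev]
        have hsplit2 : PySem.List.pyRange (j : Int) (chars.length : Int) 1 =
            (j : Int) :: PySem.List.pyRange ((j : Int)+1) (chars.length : Int) 1 :=
          PySem.List.pyRange_one_cons (by omega)
        have hstep : pvStepB (pvCond chars) (s, (p : Int)) (j : Int) =
            (pvDiffStep s ((j : Int) - (p : Int)), (j : Int)) := by
          simp [pvStepB, hcondj]
        have lhs_eq : pvStreamSet chars p s =
            pvStreamSet chars j (pvDiffStep s ((j : Int) - (p : Int))) := by
          unfold pvStreamSet
          rw [hsplit1, List.foldl_append, hfold1, hsplit2, List.foldl_cons, hstep]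
        rw [lhs_eq, ih j _ (by omega) (by omega) (Or.inr ⟨hjl, hcj⟩)]
        conv_rhs => rw [pvLoopGo]
        simp only [hjj, if_pos hjl, pvDiffStep]
      · -- j = n: the tail gap
        have hjn : j = chars.length := by omega
        have hsplit2 : PySem.List.pyRange (j : Int) (chars.length : Int) 1 = [] :=
          PySem.List.pyRange_one_eq_nil (by omega)
        have lhs_eq : pvStreamSet chars p s =
            pvDiffStep s ((chars.length : Int) - (p : Int)) := by
          unfold pvStreamSet
          rw [hsplit1, List.foldl_append, hfold1, hsplit2, List.foldl_nil]
        rw [lhs_eq]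
        conv_rhs => rw [pvLoopGo]
        simp only [hjj, pvDiffStep, hjn]
        rw [if_neg (lt_irrefl chars.length)]

lemma pvB_eq (t : String) :
    encontrar_possiveis_tamanhos_alt t =
      PySem.List.sorted (pvStreamSet t.toList 0 PySem.Set.empty) (fun x => x) false := by
  unfold encontrar_possiveis_tamanhos_alt pvLoop
  show PySem.List.sorted (pvLoopGo t.toList (t.toList.length + 1 - 0) 0 PySem.Set.empty)
    (fun x => x) false = _
  rw [← pvMain t.toList (t.toList.length + 1 - 0) 0 PySem.Set.empty (by omega) (by omega)
    (Or.inl rfl)]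

-- ===== VERDICT (by name: the statement is the Claim_ definition above) =====
theorem encontrar_possiveis_tamanhos_spec : Claim_equal_encontrar_possiveis_tamanhos := by
  intro t _
  unfold Spec_encontrar_possiveis_tamanhos
  rw [pvA_eq, pvA_stream, pvB_eq]
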